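-- pv_equiv track=rewrite | github.com/mindbomber/Alignment-Aware-Neural-Architecture--AANA- | eval_pipeline/build_unified_comparison.py | fieldnames
-- ===== SOURCE A (Python) =====
-- def fieldnames(rows):
--     preferred = [
--         "id",
--         "block",
--         "task_type",
--         "model",
--         "pressure",
--         "correction",
--         "capability_prompt",
--         "prompt",
--         "reference_notes",
--         "response_text",
--         "api_response_id",
--         "api_error",
--         "aana_trace",
--         "judge_model",
--         "capability_score",
--         "alignment_score",
--         "gap_score",
--         "decision",
--         "rationale",
--         "judge_error",
--         "source_file",
--     ]
--     present = set()
--     for row in rows: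
--         present.update(row)
--     return [field for field in preferred if field in present] + sorted(present - set(preferred))
-- ===== SOURCE B (Python) =====
-- _RANK = {
--     "id": 0,
--     "block": 1,
--     "task_type": 2,
--     "model": 3,
--     "pressure": 4,
--     "correction": 5,
--     "capability_prompt": 6,
--     "prompt": 7,
--     "reference_notes": 8,
--     "response_text": 9,
--     "api_response_id": 10,
--     "api_error": 11,
--     "aana_trace": 12,
--     "judge_model": 13,
--     "capability_score": 14,
--     "alignment_score": 15,
--     "gap_score": 16,
--     "decision": 17,
--     "rationale": 18,
--     "judge_error": 19,
--     "source_file": 20,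
-- }
--
--
-- def fieldnames(rows):
--     present = {field for row in rows for field in row}
--     return sorted(present, key=lambda f: (_RANK.get(f, 21), f))
-- ===== Notes on version B (the rewrite author's own statement) =====
-- stated objective: idiomatic
-- what changed: Replaces the two-pass filter-preferred-then-concat-sorted-rest construction (set built by iterative update) with a set comprehension plus a single sorted() under a composite key looked up in a precomputed rank table, producing the whole ordering in one sort.
import Mathlib
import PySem

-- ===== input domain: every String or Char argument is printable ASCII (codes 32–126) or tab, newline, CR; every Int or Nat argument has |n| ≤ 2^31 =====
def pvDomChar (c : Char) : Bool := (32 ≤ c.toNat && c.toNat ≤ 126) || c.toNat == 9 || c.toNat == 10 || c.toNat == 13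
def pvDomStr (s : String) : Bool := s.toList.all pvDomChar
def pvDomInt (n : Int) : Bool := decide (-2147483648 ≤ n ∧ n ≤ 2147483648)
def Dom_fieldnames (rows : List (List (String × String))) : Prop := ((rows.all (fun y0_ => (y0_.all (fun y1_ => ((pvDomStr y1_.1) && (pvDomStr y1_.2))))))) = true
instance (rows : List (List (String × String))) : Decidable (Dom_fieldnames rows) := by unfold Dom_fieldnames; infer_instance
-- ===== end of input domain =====

-- B replaces A's update-loop + filter-then-concat two-pass construction with a set
-- comprehension and one composite-key sort over a precomputed rank table (objective: idiomatic).

-- ===== PORT A =====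
def preferredA : List String :=
  ["id", "block", "task_type", "model", "pressure", "correction", "capability_prompt",
   "prompt", "reference_notes", "response_text", "api_response_id", "api_error",
   "aana_trace", "judge_model", "capability_score", "alignment_score", "gap_score",
   "decision", "rationale", "judge_error", "source_file"]

def fieldnames (rows : List (List (String × String))) : List String :=
  let present : PySem.Set String :=
    rows.foldl (fun s row => PySem.Set.update s (row.map Prod.fst)) PySem.Set.empty
  (preferredA.filter (fun field => PySem.Set.contains present field)) ++
    PySem.List.sorted (PySem.Set.diff present (PySem.Set.ofList preferredA)) (fun x => x) false

-- ===== PORT B =====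
-- _RANK = {"id": 0, "block": 1, ...}  (module-level dict literal)
def rankB : PySem.Dict String Int :=
  PySem.Dict.ofList
    [("id", 0), ("block", 1), ("task_type", 2), ("model", 3), ("pressure", 4),
     ("correction", 5), ("capability_prompt", 6), ("prompt", 7), ("reference_notes", 8),
     ("response_text", 9), ("api_response_id", 10), ("api_error", 11), ("aana_trace", 12),
     ("judge_model", 13), ("capability_score", 14), ("alignment_score", 15),
     ("gap_score", 16), ("decision", 17), ("rationale", 18), ("judge_error", 19),
     ("source_file", 20)]

def fieldnames_alt (rows : List (List (String × String))) : List String :=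
  -- present = {field for row in rows for field in row}
  let present : PySem.Set String :=
    PySem.Set.ofList (rows.flatMap (fun row => row.map Prod.fst))
  -- sorted(present, key=lambda f: (_RANK.get(f, 21), f))
  PySem.List.sorted2 present (fun f => rankB.getD f 21) (fun f => f) false

-- ===== PRECONDITION & SPEC =====
def Spec_fieldnames (rows : List (List (String × String))) (out : List String) : Prop := out = fieldnames_alt rows
instance (rows : List (List (String × String))) (out : List String) : Decidable (Spec_fieldnames rows out) := by unfold Spec_fieldnames; infer_instance

-- ===== CLAIM (what is proved, stated in full; the proofs are below) =====
def Claim_equal_fieldnames : Prop := ∀ (rows : List (List (String × String))), Dom_fieldnames rows → Spec_fieldnames rows (fieldnames rows)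

-- ===== LEMMAS AND PROOFS =====

-- B's composite sort key, as a value in the lexicographic order on Int × String.
def lexKeyB (f : String) : Lex (Int × String) := toLex (rankB.getD f 21, f)

-- sorted2 (tuple key) is sorted with the lexicographic key.
theorem sorted2_eq_sorted_lex {α : Type} (xs : List α) (k1 : α → Int) (k2 : α → String) :
    PySem.List.sorted2 xs k1 k2 false
      = PySem.List.sorted xs (fun x => (toLex (k1 x, k2 x) : Lex (Int × String))) false := by
  have hfun : (fun a b => decide (k1 a < k1 b) || (!decide (k1 b < k1 a) && decide (k2 a < k2 b)))
      = (fun a b => decide ((toLex (k1 a, k2 a) : Lex (Int × String)) < toLex (k1 b, k2 b))) := by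
    funext a b
    by_cases h1 : k1 a < k1 b
    · simp [h1, Prod.Lex.lt_iff]
    · by_cases h2 : k1 b < k1 a
      · simp [h1, h2, Prod.Lex.lt_iff]
        omega
      · have he : k1 a = k1 b := le_antisymm (not_lt.mp h2) (not_lt.mp h1)
        simp [he, Prod.Lex.lt_iff]
  unfold PySem.List.sorted2 PySem.List.sorted
  simp only [if_neg (by decide : ¬ (false = true)), hfun]

theorem nodup_presentA (rows : List (List (String × String))) (s : PySem.Set String) (hs : s.Nodup) :
    (rows.foldl (fun s row => PySem.Set.update s (row.map Prod.fst)) s).Nodup := by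
  induction rows generalizing s with
  | nil => exact hs
  | cons r rest ih => exact ih _ (PySem.Set.nodup_update _ _ hs)

theorem mem_presentA (rows : List (List (String × String))) (s : PySem.Set String) (x : String) :
    x ∈ rows.foldl (fun s row => PySem.Set.update s (row.map Prod.fst)) s
      ↔ x ∈ s ∨ x ∈ rows.flatMap (fun row => row.map Prod.fst) := by
  induction rows generalizing s with
  | nil => simp
  | cons r rest ih =>
    simp only [List.foldl_cons, List.flatMap_cons, List.mem_append, ih, PySem.Set.mem_update]
    tauto

theorem nodup_preferredA : preferredA.Nodup := by decide

theorem rank_keys : rankB.keys = preferredA := by decide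

theorem rank_getD_of_not_mem (f : String) (hf : f ∉ preferredA) :
    rankB.getD f 21 = 21 := by
  apply PySem.Dict.getD_of_not_contains
  have := PySem.Dict.contains_iff_mem_keys (d := rankB) (k := f)
  rw [rank_keys] at this
  by_contra h
  exact hf (this.mp (by revert h; cases rankB.contains f <;> simp))

theorem rank_lt_of_mem (f : String) (hf : f ∈ preferredA) :
    rankB.getD f 21 < 21 := by
  revert hf; revert f; decide

theorem pairwise_preferredA :
    preferredA.Pairwise (fun a b => lexKeyB a < lexKeyB b) := by decide

-- main pointwise equality
theorem fieldnames_eq (rows : List (List (String × String))) :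
    fieldnames rows = fieldnames_alt rows := by
  unfold fieldnames fieldnames_alt
  set presentA : PySem.Set String :=
    rows.foldl (fun s row => PySem.Set.update s (row.map Prod.fst)) PySem.Set.empty with hpa
  set presentB : PySem.Set String :=
    PySem.Set.ofList (rows.flatMap (fun row => row.map Prod.fst)) with hpb
  have hPA : presentA.Nodup := nodup_presentA rows _ (by simp [PySem.Set.empty])
  have hPB : presentB.Nodup := PySem.Set.nodup_ofList _
  have hmemAB : ∀ x, x ∈ presentA ↔ x ∈ presentB := by
    intro x
    rw [hpa, hpb, mem_presentA, PySem.Set.mem_ofList]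
    simp [PySem.Set.empty]
  have hAB : presentA.Perm presentB := (List.perm_ext_iff_of_nodup hPA hPB).mpr hmemAB
  rw [sorted2_eq_sorted_lex]
  have hkey : (fun f => (toLex (rankB.getD f 21, f) : Lex (Int × String))) = lexKeyB := by
    funext f; rfl
  rw [hkey]
  -- abbreviations for A's two parts
  set part1 : List String := preferredA.filter (fun field => PySem.Set.contains presentA field) with h1
  set dif : PySem.Set String := PySem.Set.diff presentA (PySem.Set.ofList preferredA) with hd
  set part2 : List String := PySem.List.sorted dif (fun x => x) false with h2
  have hdifNodup : dif.Nodup := List.Nodup.filter _ hPA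
  have hpart2Perm : part2.Perm dif := PySem.List.sorted_perm _ _ _
  have hpart2Nodup : part2.Nodup := (hpart2Perm.symm).nodup hdifNodup
  have hmem_dif : ∀ x, x ∈ dif ↔ x ∈ presentA ∧ x ∉ preferredA := by
    intro x
    rw [hd]
    have := PySem.Set.mem_diff (s := presentA) (t := PySem.Set.ofList preferredA) (y := x)
    rw [this]
    constructor
    · rintro ⟨hx, hnx⟩; exact ⟨hx, fun hc => hnx ((PySem.Set.mem_ofList _ _).mpr hc)⟩
    · rintro ⟨hx, hnx⟩; exact ⟨hx, fun hc => hnx ((PySem.Set.mem_ofList _ _).mp hc)⟩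
  have hmem_part1 : ∀ x, x ∈ part1 ↔ x ∈ preferredA ∧ x ∈ presentA := by
    intro x
    rw [h1, List.mem_filter]
    simp
  -- rank facts per part
  have hrank1 : ∀ x ∈ part1, rankB.getD x 21 < 21 := by
    intro x hx; exact rank_lt_of_mem x ((hmem_part1 x).mp hx).1
  have hrank2 : ∀ x ∈ part2, rankB.getD x 21 = 21 := by
    intro x hx
    have : x ∈ dif := (PySem.List.mem_sorted _ _ _ _).mp hx
    exact rank_getD_of_not_mem x ((hmem_dif x).mp this).2
  -- Pairwise
  have hpair : (part1 ++ part2).Pairwise (fun a b => lexKeyB a < lexKeyB b) := by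
    rw [List.pairwise_append]
    refine ⟨pairwise_preferredA.sublist List.filter_sublist, ?_, ?_⟩
    · have hle : part2.Pairwise (fun a b => a ≤ b) := PySem.List.sorted_pairwise _ _
      have hne : part2.Pairwise (fun a b => a ≠ b) := hpart2Nodup
      have hlt : part2.Pairwise (fun a b => a < b) :=
        (hle.and hne).imp (fun h => lt_of_le_of_ne h.1 h.2)
      refine hlt.imp_of_mem ?_
      intro a b ha hb hab
      have h2a := hrank2 a ha
      have h2b := hrank2 b hb
      exact Prod.Lex.lt_iff.mpr (Or.inr ⟨by simp [lexKeyB, h2a, h2b], hab⟩)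
    · intro a ha b hb
      have := lt_of_lt_of_le (hrank1 a ha) (le_of_eq (hrank2 b hb).symm)
      exact Prod.Lex.lt_iff.mpr (Or.inl this)
  -- Permutation with B's present set
  have hperm : (part1 ++ part2).Perm presentB := by
    have hperm1 : part1.Perm (presentA.filter (fun x => PySem.Set.contains (PySem.Set.ofList preferredA) x)) := by
      rw [List.perm_ext_iff_of_nodup (nodup_preferredA.filter _) (hPA.filter _)]
      intro x
      rw [hmem_part1, List.mem_filter]
      simp [PySem.Set.mem_ofList, and_comm]
    have hperm2 : part2.Perm (presentA.filter (fun x => !PySem.Set.contains (PySem.Set.ofList preferredA) x)) := by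
      rw [hd] at hpart2Perm
      exact hpart2Perm
    exact ((hperm1.append hperm2).trans (List.filter_append_perm _ _)).trans hAB
  exact (PySem.List.sorted_eq_of_perm_of_pairwise_lt presentB (part1 ++ part2) lexKeyB hperm hpair).symm

-- ===== VERDICT (by name: the statement is the Claim_ definition above) =====
theorem fieldnames_spec : Claim_equal_fieldnames := by
  intro rows _
  unfold Spec_fieldnames
  exact fieldnames_eq rows
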